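-- pv_equiv track=rewrite | github.com/Rohithyeravothula/leetcode | deleteProduct.py | deleteProducts
-- ===== SOURCE A (Python) =====
-- from collections import Counter
--
-- def deleteProducts(ids, m):
-- 	counter = [(val, key) for key, val in Counter(ids).items()]
-- 	counter.sort()
-- 	l = len(counter)
-- 	i = 0
-- 	while i<l:
-- 		m -= counter[i][0]
-- 		if m<0:
-- 			break
-- 		i+=1
-- 	return l-i
-- ===== SOURCE B (Python) =====
-- from collections import Counter
--
-- def deleteProducts(ids, m):
--     counts = sorted(Counter(ids).values())
--     prefix = []
--     total = 0
--     for c in counts: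
--         total += c
--         prefix.append(total)
--     # bisect_right(prefix, m): number of smallest groups fully removable within budget m
--     lo, hi = 0, len(prefix)
--     while lo < hi:
--         mid = (lo + hi) // 2
--         if prefix[mid] <= m:
--             lo = mid + 1
--         else:
--             hi = mid
--     return len(counts) - lo
-- ===== Notes on version B (the rewrite author's own statement) =====
-- stated objective: alternative
-- what changed: Replaces A's mutating subtract-and-break scan over lexicographically sorted (count,id) pairs by a prefix-sum table over sorted counts plus a hand-rolled bisect_right binary search that finds how many smallest groups fit in the budget m.
import Mathlib
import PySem

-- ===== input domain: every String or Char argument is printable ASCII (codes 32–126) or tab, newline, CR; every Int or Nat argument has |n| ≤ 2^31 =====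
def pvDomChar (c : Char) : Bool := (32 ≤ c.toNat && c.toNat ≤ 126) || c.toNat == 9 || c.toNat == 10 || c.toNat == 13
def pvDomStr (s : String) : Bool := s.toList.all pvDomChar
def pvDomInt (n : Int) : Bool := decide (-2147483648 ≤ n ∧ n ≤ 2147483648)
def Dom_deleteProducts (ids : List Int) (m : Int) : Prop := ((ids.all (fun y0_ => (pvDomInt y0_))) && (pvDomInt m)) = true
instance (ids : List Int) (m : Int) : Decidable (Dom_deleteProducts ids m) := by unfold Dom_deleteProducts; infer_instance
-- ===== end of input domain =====

-- B replaces A's mutating subtract-and-break scan with a prefix-sum table over the sorted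
-- counts plus a hand-rolled bisect_right binary search (objective: alternative, same O(n log n)).

-- ===== PORT A =====
-- the 'while i < l' loop: scans the sorted (count, id) pairs, decrementing m; returns the final i
def deleteProductsLoop : List (Int × Int) → Int → Int → Int
  | [], _, i => i
  | p :: rest, m, i =>
    let m' := m - p.1
    if m' < 0 then i else deleteProductsLoop rest m' (i + 1)

def deleteProducts (ids : List Int) (m : Int) : Int :=
  -- counter = [(val, key) for key, val in Counter(ids).items()]; counter.sort()
  let counter := (PySem.Dict.counter ids).items.map (fun p => (p.2, p.1))
  let counterS := PySem.List.sorted2 counter (fun p => p.1) (fun p => p.2)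
  let l : Int := PySem.List.len counterS
  l - deleteProductsLoop counterS m 0

-- ===== PORT B =====
-- the hand-written bisect_right loop of Source B; indices stay inside [0, len prefix), so the
-- pyGetD default is never read
def bisectLoop (pr : List Int) (m : Int) (lo hi : Int) : Int :=
  if _h : lo < hi then
    -- mid = (lo + hi) // 2, inlined at each use
    if PySem.List.pyGetD pr (PySem.Int.floordiv (lo + hi) 2) 0 ≤ m then
      bisectLoop pr m (PySem.Int.floordiv (lo + hi) 2 + 1) hi
    else bisectLoop pr m lo (PySem.Int.floordiv (lo + hi) 2)
  else lo
termination_by (hi - lo).toNat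
decreasing_by
  · have := PySem.Int.floordiv_two_mid_bounds (le_of_lt _h)
    omega
  · have : PySem.Int.floordiv (lo + hi) 2 < hi :=
      (PySem.Int.floordiv_lt_iff_lt_mul (by norm_num)).2 (by omega)
    omega

def deleteProducts_alt (ids : List Int) (m : Int) : Int :=
  let counts := PySem.List.sorted (PySem.Dict.counter ids).values (fun x => x)
  -- prefix-sum table built with a running total
  let pt := counts.foldl (fun (s : List Int × Int) c => (s.1 ++ [s.2 + c], s.2 + c)) ([], 0)
  let pre := pt.1
  let lo := bisectLoop pre m 0 (PySem.List.len pre)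
  PySem.List.len counts - lo

-- ===== PRECONDITION & SPEC =====
def Spec_deleteProducts (ids : List Int) (m : Int) (out : Int) : Prop := out = deleteProducts_alt ids m
instance (ids : List Int) (m : Int) (out : Int) : Decidable (Spec_deleteProducts ids m out) := by unfold Spec_deleteProducts; infer_instance

-- ===== CLAIM (what is proved, stated in full; the proofs are below) =====
def Claim_equal_deleteProducts : Prop := ∀ (ids : List Int) (m : Int), Dom_deleteProducts ids m → Spec_deleteProducts ids m (deleteProducts ids m)

-- ===== LEMMAS AND PROOFS =====

-- prefix sums of cs starting from running total t
def pfxSums : List Int → Int → List Int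
  | [], _ => []
  | c :: rest, t => (t + c) :: pfxSums rest (t + c)

theorem foldl_prefix (cs : List Int) (acc : List Int) (t : Int) :
    (cs.foldl (fun (s : List Int × Int) c => (s.1 ++ [s.2 + c], s.2 + c)) (acc, t)) =
      (acc ++ pfxSums cs t, t + cs.sum) := by
  induction cs generalizing acc t with
  | nil => simp [pfxSums]
  | cons c rest ih => simp [pfxSums, ih, List.append_assoc]; ring

theorem pfxSums_shift (cs : List Int) (a t : Int) :
    pfxSums cs (a + t) = (pfxSums cs t).map (a + ·) := by
  induction cs generalizing t with
  | nil => simp [pfxSums]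
  | cons c rest ih =>
    simp only [pfxSums, List.map_cons, List.cons.injEq]
    refine ⟨by ring, ?_⟩
    have h := ih (t + c)
    rw [show a + t + c = a + (t + c) by ring, h]

theorem pfxSums_length (cs : List Int) (t : Int) : (pfxSums cs t).length = cs.length := by
  induction cs generalizing t with
  | nil => rfl
  | cons c rest ih => simp [pfxSums, ih]

theorem pfxSums_lb (cs : List Int) (t : Int) (hpos : ∀ c ∈ cs, 0 < c) :
    ∀ x ∈ pfxSums cs t, t < x := by
  induction cs generalizing t with
  | nil => simp [pfxSums]
  | cons c rest ih =>
    intro x hx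
    have hc : 0 < c := hpos c (by simp)
    rcases (by simpa [pfxSums] using hx : x = t + c ∨ x ∈ pfxSums rest (t + c)) with h | h
    · omega
    · have := ih (t + c) (fun d hd => hpos d (by simp [hd])) x h; omega

theorem pfxSums_pairwise (cs : List Int) (t : Int) (hpos : ∀ c ∈ cs, 0 < c) :
    (pfxSums cs t).Pairwise (· ≤ ·) := by
  induction cs generalizing t with
  | nil => simp [pfxSums]
  | cons c rest ih =>
    simp only [pfxSums, List.pairwise_cons]
    exact ⟨fun x hx => le_of_lt (pfxSums_lb rest (t + c) (fun d hd => hpos d (by simp [hd])) x hx),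
      ih (t + c) (fun d hd => hpos d (by simp [hd]))⟩

-- A's scan counts how many prefix sums fit within the budget
theorem loopA_count (ps : List (Int × Int)) (hpos : ∀ p ∈ ps, 0 < p.1) (m i : Int) :
    deleteProductsLoop ps m i
      = i + ((pfxSums (ps.map (·.1)) 0).countP (fun x => decide (x ≤ m)) : Int) := by
  induction ps generalizing m i with
  | nil => simp [deleteProductsLoop, pfxSums]
  | cons p rest ih =>
    simp only [deleteProductsLoop, List.map_cons, pfxSums]
    by_cases h : m - p.1 < 0
    · rw [if_pos h]
      have hcnt : ((0 + p.1) :: pfxSums (rest.map (·.1)) (0 + p.1)).countP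
          (fun x => decide (x ≤ m)) = 0 := by
        rw [List.countP_eq_zero]
        intro x hx
        rcases (by simpa using hx : x = 0 + p.1 ∨ x ∈ pfxSums (rest.map (·.1)) (0 + p.1)) with hx' | hx'
        · simp only [hx', decide_eq_true_eq]; omega
        · have hxgt := pfxSums_lb (rest.map (·.1)) (0 + p.1)
            (by intro d hd; obtain ⟨q, hq, rfl⟩ := List.mem_map.1 hd; exact hpos q (by simp [hq]))
            x hx'
          simp only [decide_eq_true_eq]; omega
      rw [hcnt]; simp
    · rw [if_neg h]
      rw [ih (fun q hq => hpos q (by simp [hq]))]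
      have hshift : pfxSums (rest.map (·.1)) (0 + p.1)
          = (pfxSums (rest.map (·.1)) 0).map (p.1 + ·) := by
        rw [show (0 + p.1 : Int) = p.1 + 0 by ring, pfxSums_shift]
      rw [hshift]
      rw [List.countP_cons, List.countP_map]
      have hc : (fun x => decide (x ≤ m)) ∘ (p.1 + ·) = fun x => decide (x ≤ m - p.1) := by
        funext x; simp only [Function.comp]; rw [decide_eq_decide]; omega
      rw [hc]
      have hone : (decide ((0 : Int) + p.1 ≤ m) : Bool) = true := by
        simp only [decide_eq_true_eq]; omega
      rw [hone]
      simp only [if_true]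
      push_cast
      omega

-- count elements satisfying p when p holds exactly on the first a positions
theorem countP_of_cut (l : List Int) (p : Int → Bool) (a : Nat) (ha : a ≤ l.length)
    (h : ∀ j (hj : j < l.length), p l[j] = decide (j < a)) : l.countP p = a := by
  induction l generalizing a with
  | nil => simp at ha; simp [ha]
  | cons x xs ih =>
    cases a with
    | zero =>
      rw [List.countP_eq_zero.2]
      intro y hy
      obtain ⟨j, hj, rfl⟩ := List.mem_iff_getElem.1 hy
      simp [h j hj]
    | succ a =>
      have hx : p x = true := by simpa using h 0 (by simp)
      rw [List.countP_cons, hx]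
      have hrec := ih a (by simpa using ha) (fun j hj => by
        have := h (j + 1) (by simpa using Nat.succ_lt_succ hj)
        simpa using this)
      simp [hrec]

-- bisect_right on a sorted list returns the number of elements ≤ m
theorem bisect_count (pr : List Int) (hs : pr.Pairwise (· ≤ ·)) (m : Int) :
    ∀ (n a b : Nat), b - a ≤ n → a ≤ b → b ≤ pr.length →
      (∀ j (hj : j < pr.length), j < a → pr[j] ≤ m) →
      (∀ j (hj : j < pr.length), b ≤ j → ¬ pr[j] ≤ m) →
      bisectLoop pr m a b = (pr.countP (fun x => decide (x ≤ m)) : Int) := by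
  have hmono : ∀ (p q : Nat) (hp : p < pr.length) (hq : q < pr.length), p ≤ q → pr[p] ≤ pr[q] := by
    intro p q hp hq hpq
    rcases Nat.lt_or_ge p q with h | h
    · exact List.pairwise_iff_getElem.1 hs p q hp hq h
    · have : p = q := by omega
      subst this; exact le_refl _
  intro n
  induction n with
  | zero =>
    intro a b hn hab hb hlo hhi
    have hba : a = b := by omega
    subst hba
    rw [bisectLoop, dif_neg (by omega)]
    have : pr.countP (fun x => decide (x ≤ m)) = a :=
      countP_of_cut pr _ a (by omega) (fun j hj => by
        by_cases hja : j < a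
        · simp [hlo j hj hja, hja]
        · simp [hhi j hj (by omega), hja])
    rw [this]
  | succ n ih =>
    intro a b hn hab hb hlo hhi
    rw [bisectLoop]
    by_cases hab' : (a : Int) < (b : Int)
    · rw [dif_pos hab']
      have hmid : PySem.Int.floordiv ((a : Int) + (b : Int)) 2 = (((a + b) / 2 : Nat) : Int) := by
        rw [show ((a : Int) + (b : Int)) = ((a + b : Nat) : Int) by push_cast; ring]
        exact_mod_cast PySem.Int.floordiv_natCast (a + b) 2
      set k : Nat := (a + b) / 2 with hk
      have hak : a ≤ k := by omega
      have hkb : k < b := by omega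
      have hget : PySem.List.pyGetD pr (((a + b) / 2 : Nat) : Int) 0 = pr[k]'(by omega) := by
        rw [PySem.List.pyGetD_natCast, ← hk, List.getD_eq_getElem pr 0 (by omega)]
      rw [hmid, hget]
      by_cases hc : pr[k]'(by omega) ≤ m
      · rw [if_pos hc, show ((((a + b) / 2 : Nat) : Int) + 1) = ((k + 1 : Nat) : Int) by push_cast; omega]
        exact ih (k + 1) b (by omega) (by omega) hb
          (fun j hj hjk => le_trans (hmono j k (by omega) (by omega) (by omega)) hc) hhi
      · rw [if_neg hc, show (((a + b) / 2 : Nat) : Int) = ((k : Nat) : Int) by rw [hk]]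
        exact ih a k (by omega) (by omega) (by omega) hlo
          (fun j hj hkj => fun hle => hc (le_trans (hmono k j (by omega) hj hkj) hle))
    · rw [dif_neg hab']
      have hba : a = b := by omega
      subst hba
      have : pr.countP (fun x => decide (x ≤ m)) = a :=
        countP_of_cut pr _ a (by omega) (fun j hj => by
          by_cases hja : j < a
          · simp [hlo j hj hja, hja]
          · simp [hhi j hj (by omega), hja])
      rw [this]

-- weak lexicographic order on (count, id) pairs
def pairLE (a b : Int × Int) : Prop := a.1 < b.1 ∨ (a.1 = b.1 ∧ a.2 ≤ b.2)

-- the comparison counter.sort() uses (strict lexicographic less-than, as sorted2 builds it)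
def pairLT (a b : Int × Int) : Bool :=
  decide (a.1 < b.1) || (!decide (b.1 < a.1) && decide (a.2 < b.2))

theorem insertBy_pairLE (x : Int × Int) (ys : List (Int × Int)) (h : ys.Pairwise pairLE) :
    (PySem.List.insertBy pairLT x ys).Pairwise pairLE := by
  induction ys with
  | nil => simp [PySem.List.insertBy, pairLE]
  | cons y ys ih =>
    rw [List.pairwise_cons] at h
    by_cases hb : pairLT x y = true
    · rw [show PySem.List.insertBy pairLT x (y :: ys) = x :: y :: ys by
        simp [PySem.List.insertBy, hb]]
      have hxy : pairLE x y := by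
        simp only [pairLT, Bool.or_eq_true, Bool.and_eq_true, Bool.not_eq_true',
          decide_eq_true_eq, decide_eq_false_iff_not] at hb
        unfold pairLE; omega
      rw [List.pairwise_cons]
      refine ⟨?_, by rw [List.pairwise_cons]; exact h⟩
      intro z hz
      rcases (by simpa using hz : z = y ∨ z ∈ ys) with rfl | hz'
      · exact hxy
      · have := h.1 z hz'
        unfold pairLE at *; omega
    · rw [show PySem.List.insertBy pairLT x (y :: ys) = y :: PySem.List.insertBy pairLT x ys by
        simp [PySem.List.insertBy, hb]]
      rw [List.pairwise_cons]
      refine ⟨?_, ih h.2⟩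
      intro z hz
      rw [PySem.List.mem_insertBy] at hz
      rcases hz with rfl | hz'
      · simp only [pairLT, Bool.or_eq_true, Bool.and_eq_true, Bool.not_eq_true',
          decide_eq_true_eq, decide_eq_false_iff_not] at hb
        unfold pairLE; omega
      · exact h.1 z hz'

theorem foldl_insertBy_pairLE (ps : List (Int × Int)) (acc : List (Int × Int))
    (h : acc.Pairwise pairLE) :
    (ps.foldl (fun acc x => PySem.List.insertBy pairLT x acc) acc).Pairwise pairLE := by
  induction ps generalizing acc with
  | nil => exact h
  | cons p rest ih => exact ih _ (insertBy_pairLE p acc h)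

-- the first components of the lex-sorted (count, id) pairs are the sorted counts
theorem firsts_eq_sorted_values (ids : List Int) :
    (PySem.List.sorted2 ((PySem.Dict.counter ids).items.map (fun p => (p.2, p.1)))
        (fun p => p.1) (fun p => p.2)).map (·.1)
      = PySem.List.sorted (PySem.Dict.counter ids).values (fun x => x) := by
  set pairs := (PySem.Dict.counter ids).items.map (fun p => (p.2, p.1)) with hpairs
  have hdef : PySem.List.sorted2 pairs (fun p => p.1) (fun p => p.2)
      = pairs.foldl (fun acc x => PySem.List.insertBy pairLT x acc) [] := rfl
  have hpw : (PySem.List.sorted2 pairs (fun p => p.1) (fun p => p.2)).Pairwise pairLE := by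
    rw [hdef]; exact foldl_insertBy_pairLE pairs [] (by simp)
  have hfstpw : ((PySem.List.sorted2 pairs (fun p => p.1) (fun p => p.2)).map (·.1)).Pairwise
      (· ≤ ·) := by
    refine List.Pairwise.map _ ?_ hpw
    intro a b hab; unfold pairLE at hab; omega
  have hperm : ((PySem.List.sorted2 pairs (fun p => p.1) (fun p => p.2)).map (·.1)).Perm
      (PySem.Dict.counter ids).values := by
    have h1 : (PySem.List.sorted2 pairs (fun p => p.1) (fun p => p.2)).Perm pairs :=
      PySem.List.sorted2_perm pairs _ _ false
    have h2 := h1.map (·.1)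
    have h3 : pairs.map (·.1) = (PySem.Dict.counter ids).values := by
      rw [hpairs]
      simp only [List.map_map]
      rfl
    rw [h3] at h2
    exact h2
  exact (PySem.List.sorted_id_eq_of_perm_of_pairwise _ _ hperm hfstpw).symm

theorem counts_pos (ids : List Int) :
    ∀ c ∈ PySem.List.sorted (PySem.Dict.counter ids).values (fun x => x), 0 < c := by
  intro c hc
  rw [PySem.List.mem_sorted] at hc
  have hv : (PySem.Dict.counter ids).values = (PySem.Dict.counter ids).items.map (·.2) := rfl
  rw [hv, PySem.Dict.items_counter] at hc
  simp only [List.map_map, List.mem_map, Function.comp] at hc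
  obtain ⟨k, hk, rfl⟩ := hc
  have : k ∈ ids := (PySem.Set.mem_ofList ids k).1 hk
  exact_mod_cast List.count_pos_iff.2 this

theorem deleteProducts_core (sp : List (Int × Int)) (cs : List Int) (m : Int)
    (hfst : sp.map (·.1) = cs) (hpos : ∀ c ∈ cs, 0 < c) :
    (sp.length : Int) - deleteProductsLoop sp m 0
      = (cs.length : Int) - bisectLoop (pfxSums cs 0) m 0 ((pfxSums cs 0).length : Int) := by
  have hppos : ∀ p ∈ sp, 0 < p.1 := fun p hp =>
    hpos p.1 (by rw [← hfst]; exact List.mem_map_of_mem hp)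
  have hlen : sp.length = cs.length := by rw [← hfst, List.length_map]
  have hb := bisect_count (pfxSums cs 0) (pfxSums_pairwise cs 0 hpos) m cs.length 0 cs.length
      (by omega) (by omega) (by rw [pfxSums_length])
      (fun j hj hj0 => absurd hj0 (by omega))
      (fun j hj hjb => by rw [pfxSums_length] at hj; omega)
  simp only [Nat.cast_zero] at hb
  rw [pfxSums_length, hb, loopA_count sp hppos m 0, hfst, hlen]
  ring

-- ===== VERDICT (by name: the statement is the Claim_ definition above) =====
theorem deleteProducts_spec : Claim_equal_deleteProducts := by
  intro ids m _
  unfold Spec_deleteProducts deleteProducts deleteProducts_alt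
  simp only [PySem.List.len_eq, foldl_prefix, List.nil_append]
  exact deleteProducts_core _ _ m (firsts_eq_sorted_values ids) (counts_pos ids)
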